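-- pv_equiv track=rewrite | github.com/KrayziCoder11/WebsiteDB | website/logic.py | get_ten
-- ===== SOURCE A (Python) =====
-- def get_ten(computers, index):
--     ten = []
--     index = index * 10
--     #if page can be completely filled
--     if len(computers) >= (index):
--         index = index - 10
--         for i in range(0, 10):
--             ten.append(computers[index + i])
--
--     #if parital page
--     elif len(computers) < (index) and len(computers) > (index - 10):
--         index = index - 10
--         for i in range(0, (len(computers) % 10)):
--             ten.append(computers[index + i])
--
--     #if page isnt filled
--     elif len(computers) < (index - 10):
--         return get_ten(computers, int(index /10) - 1)
--
--     return ten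
-- ===== SOURCE B (Python) =====
-- def get_ten(computers, index):
--     # Iterative page search instead of tail recursion: walk the page counter
--     # down until the page overlaps the data, then emit that page in one place.
--     page = index
--     while len(computers) < page * 10 - 10:
--         page -= 1
--     start = page * 10 - 10
--     if len(computers) >= page * 10:
--         return [computers[start + i] for i in range(10)]
--     if len(computers) > start:
--         return [computers[start + i] for i in range(len(computers) % 10)]
--     return []
-- ===== Notes on version B (the rewrite author's own statement) =====
-- stated objective: simpler
-- what changed: Replaced A's tail recursion (with its int(index/10)-1 re-derivation of the page) by a while loop that decrements the page counter until the page overlaps the data, and replaced the per-branch append loops by list comprehensions emitted at one place.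
import Mathlib
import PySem

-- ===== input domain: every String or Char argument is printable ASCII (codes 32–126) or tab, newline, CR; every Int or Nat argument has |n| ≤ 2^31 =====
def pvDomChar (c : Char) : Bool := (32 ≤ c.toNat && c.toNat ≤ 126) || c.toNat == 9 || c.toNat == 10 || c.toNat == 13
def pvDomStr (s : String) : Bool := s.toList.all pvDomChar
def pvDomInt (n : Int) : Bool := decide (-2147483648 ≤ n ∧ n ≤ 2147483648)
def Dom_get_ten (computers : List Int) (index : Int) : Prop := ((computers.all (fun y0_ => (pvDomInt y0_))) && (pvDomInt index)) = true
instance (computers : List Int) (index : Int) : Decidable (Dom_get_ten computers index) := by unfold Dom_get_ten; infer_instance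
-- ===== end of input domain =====

-- B replaces A's tail recursion by a while loop that walks the page counter down,
-- and emits each page with a comprehension instead of repeated appends (objective: simpler).

-- ===== PORT A =====
-- literal transliteration of A; Pre_ excludes the inputs where Python raises IndexError,
-- so out-of-range accesses (which return none) are defaulted with .getD 0.
def get_ten (computers : List Int) (index : Int) : List Int :=
  let idx := index * 10
  if (computers.length : Int) ≥ idx then
    -- for i in range(0, 10): ten.append(computers[index + i])
    (PySem.List.pyRange 0 10 1).foldl
      (fun ten i => ten ++ [(PySem.List.pyGet? computers ((idx - 10) + i)).getD 0]) []
  else if (computers.length : Int) < idx ∧ (computers.length : Int) > idx - 10 then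
    (PySem.List.pyRange 0 ((computers.length : Int) % 10) 1).foldl
      (fun ten i => ten ++ [(PySem.List.pyGet? computers ((idx - 10) + i)).getD 0]) []
  else if (computers.length : Int) < idx - 10 then
    -- int(index/10) - 1: idx is a multiple of 10, so true division is exact = floordiv
    get_ten computers (PySem.Int.floordiv idx 10 - 1)
  else []
termination_by (index * 10 - 10 - computers.length).toNat
decreasing_by
  simp only [PySem.Int.floordiv_eq_ediv_of_pos (by omega : (0:Int) < 10)]
  have h10 : index * 10 / 10 = index := Int.mul_ediv_cancel index (by omega)
  omega

-- ===== PORT B =====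
-- while len(computers) < page * 10 - 10: page -= 1
def get_ten_alt_loop (n page : Int) : Int :=
  if n < page * 10 - 10 then get_ten_alt_loop n (page - 1) else page
termination_by (page * 10 - 10 - n).toNat
decreasing_by omega

def get_ten_alt (computers : List Int) (index : Int) : List Int :=
  let n : Int := (computers.length : Int)
  let page := get_ten_alt_loop n index
  let start := page * 10 - 10
  if n ≥ page * 10 then
    (PySem.List.pyRange 0 10 1).map (fun i => (PySem.List.pyGet? computers (start + i)).getD 0)
  else if n > start then
    (PySem.List.pyRange 0 (n % 10) 1).map (fun i => (PySem.List.pyGet? computers (start + i)).getD 0)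
  else []

-- ===== PRECONDITION & SPEC =====
-- Pre_ excludes exactly the inputs on which Python A raises IndexError: a call that ends
-- in the full-page branch with a negative start whose wrapped accesses fall off the list
-- (index ≤ 0 and fewer than 10*(1-index) elements). B raises there too.
def Pre_get_ten (computers : List Int) (index : Int) : Prop :=
  1 ≤ index ∨ 10 * (1 - index) ≤ (computers.length : Int)
instance (computers : List Int) (index : Int) : Decidable (Pre_get_ten computers index) := by
  unfold Pre_get_ten; infer_instance

def pvWitness_get_ten : List Int × Int := ([3, 1, 2], 1)

def Spec_get_ten (computers : List Int) (index : Int) (out : List Int) : Prop := out = get_ten_alt computers index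
instance (computers : List Int) (index : Int) (out : List Int) : Decidable (Spec_get_ten computers index out) := by unfold Spec_get_ten; infer_instance

-- ===== CLAIM (what is proved, stated in full; the proofs are below) =====
def Claim_equal_get_ten : Prop := ∀ (computers : List Int) (index : Int), Dom_get_ten computers index → Pre_get_ten computers index → Spec_get_ten computers index (get_ten computers index)

-- ===== LEMMAS AND PROOFS =====


theorem get_ten_alt_eq (computers : List Int) (index : Int) :
    get_ten_alt computers index =
      (if (computers.length : Int) ≥ (get_ten_alt_loop (computers.length : Int) index) * 10 then
        (PySem.List.pyRange 0 10 1).map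
          (fun i => (PySem.List.pyGet? computers ((get_ten_alt_loop (computers.length : Int) index) * 10 - 10 + i)).getD 0)
      else if (computers.length : Int) > (get_ten_alt_loop (computers.length : Int) index) * 10 - 10 then
        (PySem.List.pyRange 0 ((computers.length : Int) % 10) 1).map
          (fun i => (PySem.List.pyGet? computers ((get_ten_alt_loop (computers.length : Int) index) * 10 - 10 + i)).getD 0)
      else []) := rfl

theorem loop_stop (n page : Int) (h : ¬ n < page * 10 - 10) : get_ten_alt_loop n page = page := by
  rw [get_ten_alt_loop, if_neg h]

theorem loop_step (n page : Int) (h : n < page * 10 - 10) :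
    get_ten_alt_loop n page = get_ten_alt_loop n (page - 1) := by
  rw [get_ten_alt_loop, if_pos h]

theorem fold_append_eq_map (computers : List Int) (l : List Int) (s : Int) (acc : List Int) :
    l.foldl (fun ten i => ten ++ [(PySem.List.pyGet? computers (s + i)).getD 0]) acc
      = acc ++ l.map (fun i => (PySem.List.pyGet? computers (s + i)).getD 0) := by
  induction l generalizing acc with
  | nil => simp
  | cons x xs ih => simp [List.foldl, ih]

-- the ports agree on every input (also outside Pre_, where both model the raising access with a default)
theorem ports_agree (computers : List Int) (index : Int) :
    get_ten computers index = get_ten_alt computers index := by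
  rw [get_ten]
  by_cases h1 : (computers.length : Int) ≥ index * 10
  · rw [if_pos h1]
    rw [get_ten_alt_eq, loop_stop _ _ (by omega : ¬ (computers.length : Int) < index * 10 - 10)]
    rw [if_pos (by omega), fold_append_eq_map]
    simp [sub_add_eq_add_sub]
  · rw [if_neg h1]
    by_cases h2 : (computers.length : Int) < index * 10 ∧ (computers.length : Int) > index * 10 - 10
    · rw [if_pos h2]
      rw [get_ten_alt_eq, loop_stop _ _ (by omega : ¬ (computers.length : Int) < index * 10 - 10)]
      rw [if_neg (by omega), if_pos (by omega), fold_append_eq_map]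
      simp
    · rw [if_neg h2]
      by_cases h3 : (computers.length : Int) < index * 10 - 10
      · rw [if_pos h3]
        have hfd : PySem.Int.floordiv (index * 10) 10 - 1 = index - 1 := by
          rw [PySem.Int.floordiv_eq_ediv_of_pos (by omega : (0:Int) < 10)]
          have := Int.mul_ediv_cancel index (show (10:Int) ≠ 0 by omega)
          omega
        rw [hfd]
        have ih := ports_agree computers (index - 1)
        rw [ih]
        -- B's loop takes the same step
        rw [get_ten_alt_eq, get_ten_alt_eq,
          loop_step _ _ (by omega : (computers.length : Int) < index * 10 - 10)]
      · rw [if_neg h3]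
        rw [get_ten_alt_eq, loop_stop _ _ (by omega : ¬ (computers.length : Int) < index * 10 - 10)]
        rw [if_neg (by omega), if_neg (by omega)]
termination_by (index * 10 - 10 - computers.length).toNat
decreasing_by omega

-- ===== VERDICT (by name: the statement is the Claim_ definition above) =====
theorem get_ten_spec : Claim_equal_get_ten := by
  intro computers index _ _
  unfold Spec_get_ten
  exact ports_agree computers index
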